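-- pv_equiv track=rewrite | github.com/iKostanOrg/codewars | kyu_6/color_choice/checkchoose.py | checkchoose
-- ===== SOURCE A (Python) =====
-- from math import factorial
--
-- def checkchoose(m: int, n: int) -> int:
--     """
--     Knowing m (number of posters to design), knowing n
--     (total number of available colors), search x
--     (number of colors for each poster so that each poster
--     has a unique combination of colors and the number of
--     combinations is exactly the same as the number of posters).
--     :param m:
--     :param n:
--     :return:
--     """
--
--     for x in range(1, n + 1):
--
--         temp: int = factorial(n) // (factorial(x) * factorial(n - x))
--
--         if m == temp and n != x:
--             return x
--
--         if m == temp and n == x: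
--             return 0
--
--     return -1
-- ===== SOURCE B (Python) =====
-- def checkchoose(m: int, n: int) -> int:
--     # Incremental binomial: C(n,x) = C(n,x-1)*(n-x+1)//x, no factorials.
--     if n < 1:
--         return -1
--     if m == 1:
--         return 0  # C(n,x)==1 only at x==n, which A encodes as 0
--     c = 1
--     for x in range(1, n):
--         c = c * (n - x + 1) // x
--         if c == m:
--             return x
--     return -1
-- ===== Notes on version B (the rewrite author's own statement) =====
-- stated objective: faster
-- what changed: replaces the per-iteration recomputation of three factorials by a single running coefficient updated via C(n,x)=C(n,x-1)*(n-x+1)//x, with the m==1 / n<1 cases resolved up front so the loop never reaches x==n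
import Mathlib
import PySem

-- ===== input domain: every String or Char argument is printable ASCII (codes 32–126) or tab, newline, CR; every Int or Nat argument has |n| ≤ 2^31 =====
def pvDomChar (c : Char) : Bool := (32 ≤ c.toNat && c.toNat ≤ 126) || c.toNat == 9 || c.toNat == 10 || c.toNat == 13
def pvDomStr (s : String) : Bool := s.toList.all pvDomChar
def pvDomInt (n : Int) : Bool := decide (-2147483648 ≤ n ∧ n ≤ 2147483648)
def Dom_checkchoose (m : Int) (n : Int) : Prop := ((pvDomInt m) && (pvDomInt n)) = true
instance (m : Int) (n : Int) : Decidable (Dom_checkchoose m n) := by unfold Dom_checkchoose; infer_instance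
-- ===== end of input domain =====

-- B replaces A's per-iteration factorial recomputations by one running binomial coefficient
-- updated incrementally (faster in a timing run); return value equivalence proved below.


-- ===== PORT A =====
-- math.factorial; exact for k ≥ 0, the only arguments A's loop ever passes (1 ≤ x ≤ n).
def intFact (k : Int) : Int := Int.ofNat (Nat.factorial k.toNat)

-- A's for-loop over range(1, n+1) with its two early returns, as structural recursion.
def ccLoopA (m n : Int) : List Int → Int
  | [] => -1
  | x :: xs =>
    let temp : Int := PySem.Int.floordiv (intFact n) (intFact x * intFact (n - x))
    if m = temp ∧ n ≠ x then x
    else if m = temp ∧ n = x then 0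
    else ccLoopA m n xs

def checkchoose (m : Int) (n : Int) : Int :=
  ccLoopA m n (PySem.List.pyRange 1 (n + 1) 1)

-- ===== PORT B =====
-- B's for-loop over range(1, n) carrying the running coefficient c.
def ccLoopB (m n : Int) (c : Int) : List Int → Int
  | [] => -1
  | x :: xs =>
    let c' : Int := PySem.Int.floordiv (c * (n - x + 1)) x
    if c' = m then x else ccLoopB m n c' xs

def checkchoose_alt (m : Int) (n : Int) : Int :=
  if n < 1 then -1
  else if m = 1 then 0
  else ccLoopB m n 1 (PySem.List.pyRange 1 n 1)

-- ===== PRECONDITION & SPEC =====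
def Spec_checkchoose (m : Int) (n : Int) (out : Int) : Prop := out = checkchoose_alt m n
instance (m : Int) (n : Int) (out : Int) : Decidable (Spec_checkchoose m n out) := by unfold Spec_checkchoose; infer_instance

-- ===== CLAIM (what is proved, stated in full; the proofs are below) =====
def Claim_equal_checkchoose : Prop := ∀ (m : Int) (n : Int), Dom_checkchoose m n → Spec_checkchoose m n (checkchoose m n)

-- ===== LEMMAS AND PROOFS =====

-- A's factorial quotient is the binomial coefficient.
lemma temp_eq (n x : Int) (h1 : 1 ≤ x) (h2 : x ≤ n) :
    PySem.Int.floordiv (intFact n) (intFact x * intFact (n - x)) =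
      (n.toNat.choose x.toNat : Int) := by
  unfold intFact
  have hsub : (n - x).toNat = n.toNat - x.toNat := by omega
  rw [hsub]
  rw [show Int.ofNat x.toNat.factorial * Int.ofNat (n.toNat - x.toNat).factorial
        = ((x.toNat.factorial * (n.toNat - x.toNat).factorial : Nat) : Int) by simp]
  rw [show Int.ofNat n.toNat.factorial = ((n.toNat.factorial : Nat) : Int) from rfl]
  rw [PySem.Int.floordiv_natCast]
  rw [← Nat.choose_eq_factorial_div_factorial (show x.toNat ≤ n.toNat by omega)]

-- B's incremental update is exact: C(n,x) = C(n,x-1)·(n-x+1) // x.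
lemma step_eq (n x : Int) (h1 : 1 ≤ x) (h2 : x ≤ n) :
    PySem.Int.floordiv ((n.toNat.choose (x.toNat - 1) : Int) * (n - x + 1)) x =
      (n.toNat.choose x.toNat : Int) := by
  have hx : (0 : Int) < x := by omega
  obtain ⟨Y, hY⟩ : ∃ Y, x.toNat = Y + 1 := ⟨x.toNat - 1, by omega⟩
  have h := Nat.choose_succ_right_eq n.toNat Y
  have h' : (n.toNat.choose (Y + 1) : Int) * ((Y + 1 : Nat) : Int)
      = (n.toNat.choose Y : Int) * ((n.toNat - Y : Nat) : Int) := by exact_mod_cast congrArg (Nat.cast (R := Int)) h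
  have c1 : ((Y + 1 : Nat) : Int) = x := by omega
  have c2 : ((n.toNat - Y : Nat) : Int) = n - x + 1 := by omega
  rw [c1, c2] at h'
  have hmul : (n.toNat.choose (x.toNat - 1) : Int) * (n - x + 1) = (n.toNat.choose x.toNat : Int) * x := by
    rw [show x.toNat - 1 = Y by omega, hY, ← h']
  rw [hmul, PySem.Int.floordiv_eq_ediv_of_pos hx, Int.mul_ediv_cancel _ (by omega : x ≠ 0)]

-- C(N,X) ≥ N for 1 ≤ X < N.
lemma choose_ge (N : Nat) : ∀ X : Nat, 1 ≤ X → X < N → N ≤ N.choose X := by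
  induction N with
  | zero => intro X h1 h2; omega
  | succ N ih =>
    intro X h1 h2
    rcases Nat.lt_or_ge X N with h | h
    · obtain ⟨Y, rfl⟩ : ∃ Y, X = Y + 1 := ⟨X - 1, by omega⟩
      rw [Nat.choose_succ_succ]
      have hp := Nat.choose_pos (show Y ≤ N by omega)
      have hih := ih (Y + 1) h1 h
      have hs : N.choose Y.succ = N.choose (Y + 1) := rfl
      omega
    · have hXN : X = N := by omega
      rw [hXN, Nat.choose_succ_self_right]

lemma ccLoopA_cons (m n x : Int) (xs : List Int) :
    ccLoopA m n (x :: xs) =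
      (if m = PySem.Int.floordiv (intFact n) (intFact x * intFact (n - x)) ∧ n ≠ x then x
       else if m = PySem.Int.floordiv (intFact n) (intFact x * intFact (n - x)) ∧ n = x then 0
       else ccLoopA m n xs) := rfl

lemma ccLoopB_cons (m n c x : Int) (xs : List Int) :
    ccLoopB m n c (x :: xs) =
      (if PySem.Int.floordiv (c * (n - x + 1)) x = m then x
       else ccLoopB m n (PySem.Int.floordiv (c * (n - x + 1)) x) xs) := rfl

-- m = 1: A scans through every x < n (where C(n,x) > 1) and returns 0 at x = n.
lemma loopA_one (n : Int) : ∀ (d : Nat) (k : Int), 1 ≤ k → k ≤ n → (n - k).toNat = d →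
    ccLoopA 1 n (PySem.List.pyRange k (n + 1) 1) = 0 := by
  intro d
  induction d with
  | zero =>
    intro k h1 h2 hd
    have hk : k = n := by omega
    subst hk
    rw [PySem.List.pyRange_one_cons (by omega), PySem.List.pyRange_one_eq_nil (by omega),
        ccLoopA_cons, temp_eq k k h1 h2, Nat.choose_self]
    norm_num
  | succ d ih =>
    intro k h1 h2 hd
    have hkn : k < n := by omega
    rw [PySem.List.pyRange_one_cons (by omega), ccLoopA_cons, temp_eq n k h1 h2]
    have hge : n.toNat ≤ n.toNat.choose k.toNat := choose_ge n.toNat k.toNat (by omega) (by omega)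
    have hne : (1 : Int) ≠ (n.toNat.choose k.toNat : Int) := by
      have : 2 ≤ n.toNat := by omega
      have : (2 : Int) ≤ (n.toNat.choose k.toNat : Int) := by exact_mod_cast le_trans this hge
      omega
    rw [if_neg (by tauto), if_neg (by tauto)]
    exact ih (k + 1) (by omega) (by omega) (by omega)

-- m ≠ 1: the two loops track each other, B's coefficient being C(n, x-1) at entry of x.
lemma loop_eq (m n : Int) (hm : m ≠ 1) : ∀ (d : Nat) (k : Int), 1 ≤ k → k ≤ n → (n - k).toNat = d →
    ccLoopA m n (PySem.List.pyRange k (n + 1) 1)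
      = ccLoopB m n (n.toNat.choose (k.toNat - 1) : Int) (PySem.List.pyRange k n 1) := by
  intro d
  induction d with
  | zero =>
    intro k h1 h2 hd
    have hk : k = n := by omega
    subst hk
    rw [PySem.List.pyRange_one_cons (by omega), PySem.List.pyRange_one_eq_nil (le_refl (k + 1)),
        PySem.List.pyRange_one_eq_nil (le_refl k),
        ccLoopA_cons, temp_eq k k h1 h2, Nat.choose_self]
    rw [if_neg (by simp [hm]), if_neg (by simpa using hm)]
    rfl
  | succ d ih =>
    intro k h1 h2 hd
    have hkn : k < n := by omega
    rw [PySem.List.pyRange_one_cons (show k < n + 1 by omega),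
        PySem.List.pyRange_one_cons hkn,
        ccLoopA_cons, ccLoopB_cons, temp_eq n k h1 h2, step_eq n k h1 h2]
    by_cases hEq : m = (n.toNat.choose k.toNat : Int)
    · rw [if_pos ⟨hEq, by omega⟩, if_pos hEq.symm]
    · rw [if_neg (by tauto), if_neg (by tauto), if_neg (fun h => hEq h.symm)]
      have := ih (k + 1) (by omega) (by omega) (by omega)
      rw [show (k + 1).toNat - 1 = k.toNat by omega] at this
      exact this

-- ===== VERDICT (by name: the statement is the Claim_ definition above) =====
theorem checkchoose_spec : Claim_equal_checkchoose := by
  intro m n _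
  unfold Spec_checkchoose checkchoose checkchoose_alt
  by_cases hn : n < 1
  · rw [if_pos hn, PySem.List.pyRange_one_eq_nil (by omega)]
    rfl
  · rw [if_neg hn]
    by_cases hm : m = 1
    · rw [if_pos hm, hm]
      exact loopA_one n (n - 1).toNat 1 (le_refl 1) (by omega) rfl
    · rw [if_neg hm]
      have := loop_eq m n hm (n - 1).toNat 1 (le_refl 1) (by omega) rfl
      simpa using this
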